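-- pv_equiv track=rewrite | github.com/dramorak/utility-module-python | mutility.py | create_inverse
-- ===== SOURCE A (Python) =====
-- def create_inverse(graph):
--     #Generates the inverse 'graph' of the graph given
--     #<graph> is a list of input-output tuples.
--     #Example: if <graph> is the graph of x**2, then <graph> might be [(-1, 1), (0,0), (1,1), (2,4), (3,9)]
--     #         create_inverse(graph) = [(0,[0]), (1,[-1,1]), (4,[2]), (9,[3])]
--
--     #skeleton
--     #generate a dict struct whos keys are the outputs, and whos values are the inputs which lead to those outputs.
--     d = {}
--     for p in graph:
--         if d.get(p[1]):
--             d[p[1]].append(p[0])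
--         else:
--             d[p[1]] = [p[0]]
--
--
--     #return an ordered list of key/value pairs.
--     """ What methods do dicts have again?"""
--     key_vals = []
--     keys = d.keys()
--     for key in keys:
--         key_vals.append((key, d[key]))
--
--     key_vals.sort(key = lambda x: x[0])
--
--     #return key_vals
--     return key_vals
-- ===== SOURCE B (Python) =====
-- def create_inverse(graph):
--     # Same result as A: distinct outputs in ascending order, each paired with
--     # the inputs that map to it, in original appearance order.
--     keys = sorted(set(y for _, y in graph))
--     return [(k, [x for x, y in graph if y == k]) for k in keys]
-- ===== Notes on version B (the rewrite author's own statement) =====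
-- stated objective: simpler
-- what changed: Replaces the dict-accumulation loop plus key/value rebuild plus in-place sort by a two-line comprehension: sort the distinct output values, then collect the matching inputs by one filtering scan per key.
import Mathlib
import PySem

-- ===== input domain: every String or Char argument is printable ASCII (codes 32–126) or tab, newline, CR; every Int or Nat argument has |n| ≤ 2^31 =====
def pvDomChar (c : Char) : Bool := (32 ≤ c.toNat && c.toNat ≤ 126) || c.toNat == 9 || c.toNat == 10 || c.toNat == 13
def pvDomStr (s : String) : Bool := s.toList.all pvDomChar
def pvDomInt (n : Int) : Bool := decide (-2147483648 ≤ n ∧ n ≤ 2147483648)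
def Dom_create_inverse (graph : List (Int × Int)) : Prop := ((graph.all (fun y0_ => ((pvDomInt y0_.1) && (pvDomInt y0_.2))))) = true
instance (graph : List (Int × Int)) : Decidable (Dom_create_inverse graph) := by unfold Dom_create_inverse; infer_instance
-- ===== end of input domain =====

-- B replaces A's dict-accumulation loop + key/value rebuild + sort by sorting the
-- distinct output values and collecting the matching inputs with one scan per key (objective: simpler).

-- ===== PORT A =====
-- d = {}; for p in graph: if d.get(p[1]): d[p[1]].append(p[0]) else: d[p[1]] = [p[0]]
-- (the truthiness test 'if d.get(p[1])' is ported as 'getD p.2 [] ≠ []': both None and [] are falsy;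
--  the in-place append is Dict.modify, which keeps the entry's position exactly like Python)
-- key_vals = []; for key in d.keys(): key_vals.append((key, d[key])); key_vals.sort(key=fst)
def create_inverse (graph : List (Int × Int)) : List (Int × List Int) :=
  let d := graph.foldl
    (fun (d : PySem.Dict Int (List Int)) (p : Int × Int) =>
      if d.getD p.2 [] ≠ [] then d.modify p.2 [] (fun v => v ++ [p.1])
      else d.insert p.2 [p.1])
    PySem.Dict.empty
  let key_vals := d.keys.foldl (fun acc k => acc ++ [(k, (d.get? k).getD [])]) []
  PySem.List.sorted key_vals (fun x => x.1) false

-- ===== PORT B =====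
-- keys = sorted(set(y for _, y in graph)); return [(k, [x for x, y in graph if y == k]) for k in keys]
def create_inverse_alt (graph : List (Int × Int)) : List (Int × List Int) :=
  let keys := PySem.List.sorted (PySem.Set.ofList (graph.map (fun p => p.2))) (fun k => k) false
  keys.map (fun k => (k, (graph.filter (fun p => p.2 == k)).map (fun p => p.1)))

-- ===== PRECONDITION & SPEC =====
def Spec_create_inverse (graph : List (Int × Int)) (out : List (Int × List Int)) : Prop := out = create_inverse_alt graph
instance (graph : List (Int × Int)) (out : List (Int × List Int)) : Decidable (Spec_create_inverse graph out) := by unfold Spec_create_inverse; infer_instance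

-- ===== CLAIM (what is proved, stated in full; the proofs are below) =====
def Claim_equal_create_inverse : Prop := ∀ (graph : List (Int × Int)), Dom_create_inverse graph → Spec_create_inverse graph (create_inverse graph)

-- ===== LEMMAS AND PROOFS =====

-- A's loop body (truthiness branch) is exactly 'd[p[1]] = d.get(p[1], []) + [p[0]]':
-- when the key is absent or holds [], both branches insert [p.1] at the same position.
lemma ci_step_eq :
    (fun (d : PySem.Dict Int (List Int)) (p : Int × Int) =>
      if d.getD p.2 [] ≠ [] then d.modify p.2 [] (fun v => v ++ [p.1])
      else d.insert p.2 [p.1])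
    = fun (d : PySem.Dict Int (List Int)) (p : Int × Int) =>
        d.modify p.2 [] (fun v => v ++ [p.1]) := by
  funext d p
  by_cases h : d.getD p.2 [] = []
  · have hm : d.modify p.2 [] (fun v => v ++ [p.1])
        = d.insert p.2 (d.getD p.2 [] ++ [p.1]) := rfl
    simp [h, hm]
  · simp [h]

-- the dict built by A's loop: its keys are the distinct outputs in first-occurrence
-- order, and each key holds the inputs mapping to it, in appearance order
lemma ci_dict_keys (graph : List (Int × Int)) :
    (graph.foldl (fun (d : PySem.Dict Int (List Int)) p =>
        d.modify p.2 [] (fun v => v ++ [p.1])) PySem.Dict.empty).keys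
      = PySem.Set.ofList (graph.map (fun p => p.2)) := by
  have h := PySem.Dict.keys_foldl_modify_key graph (fun p => p.2) []
    (fun _ p => fun v => v ++ [p.1]) PySem.Dict.empty
  simpa using h

lemma ci_dict_getD (graph : List (Int × Int)) (k : Int) :
    (graph.foldl (fun (d : PySem.Dict Int (List Int)) p =>
        d.modify p.2 [] (fun v => v ++ [p.1])) PySem.Dict.empty).getD k []
      = (graph.filter (fun p => p.2 == k)).map (fun p => p.1) := by
  have h := PySem.Dict.getD_foldl_modify_append (graph.map Prod.swap) PySem.Dict.empty k
  rw [List.foldl_map] at h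
  simpa [List.filter_map, Function.comp_def] using h

-- ===== VERDICT (by name: the statement is the Claim_ definition above) =====
theorem create_inverse_spec : Claim_equal_create_inverse := by
  intro graph _
  unfold Spec_create_inverse create_inverse create_inverse_alt
  rw [ci_step_eq]
  dsimp only
  set d := graph.foldl (fun (d : PySem.Dict Int (List Int)) p =>
      d.modify p.2 [] (fun v => v ++ [p.1])) PySem.Dict.empty with hd
  rw [PySem.List.foldl_append_singleton_eq_map, List.nil_append]
  have hkv : d.keys.map (fun k => (k, (d.get? k).getD []))
      = (PySem.Set.ofList (graph.map (fun p => p.2))).map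
          (fun k => (k, (graph.filter (fun p => p.2 == k)).map (fun p => p.1))) := by
    rw [hd, ci_dict_keys]
    apply List.map_congr_left
    intro k _
    rw [← PySem.Dict.getD_eq_get?_getD, ← hd, hd, ci_dict_getD]
  rw [hkv]
  apply PySem.List.sorted_eq_of_perm_of_pairwise_lt
  · exact (PySem.List.sorted_perm _ _ _).map _
  · rw [List.pairwise_map]
    exact PySem.List.sorted_ofList_pairwise_lt (graph.map (fun p => p.2))
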